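-- pv_equiv track=rewrite | github.com/tony9402/baekjoon-solution | solutions/python/17288/main.py | solution
-- ===== SOURCE A (Python) =====
-- def solution(S: str) -> int:
--     ans, cnt = 0, 1
--     for i in range(1, len(S)):
--         if ord(S[i]) - ord(S[i - 1]) == 1:
--             cnt += 1
--         else:
--             if cnt == 3: ans += 1
--             cnt = 1
--     if cnt == 3: ans += 1
--     return ans
-- ===== SOURCE B (Python) =====
-- def solution(S: str) -> int:
--     n = len(S)
--
--     def is_exact_triple_start(i):
--         # S[i..i+2] is an increasing-by-1 triple that is maximal on both sides
--         return (ord(S[i + 1]) - ord(S[i]) == 1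
--                 and ord(S[i + 2]) - ord(S[i + 1]) == 1
--                 and (i == 0 or ord(S[i]) - ord(S[i - 1]) != 1)
--                 and (i + 3 == n or ord(S[i + 3]) - ord(S[i + 2]) != 1))
--
--     return sum(1 for i in range(n - 2) if is_exact_triple_start(i))
-- ===== Notes on version B (the rewrite author's own statement) =====
-- stated objective: alternative
-- what changed: Replaces the running run-length counter reset on breaks with a stateless scan over start indices that counts fixed 3-char windows which are increasing-by-1 and maximal on both sides.
import Mathlib
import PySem

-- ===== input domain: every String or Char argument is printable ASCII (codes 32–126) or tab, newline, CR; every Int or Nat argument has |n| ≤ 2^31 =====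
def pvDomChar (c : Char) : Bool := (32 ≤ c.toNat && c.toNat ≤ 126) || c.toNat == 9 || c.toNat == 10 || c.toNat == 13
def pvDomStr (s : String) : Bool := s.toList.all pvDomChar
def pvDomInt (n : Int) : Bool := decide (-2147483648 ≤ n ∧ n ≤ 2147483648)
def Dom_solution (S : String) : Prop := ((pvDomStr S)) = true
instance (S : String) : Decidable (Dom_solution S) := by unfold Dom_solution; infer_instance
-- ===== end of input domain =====

-- B replaces A's running run-length counter with a stateless count of maximal increasing-by-1 triples (alternative decomposition, same cost).


def pvOrd (c : Char) : Int := (c.toNat : Int)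

-- ===== PORT A =====
-- A's loop over i in range(1, len(S)) with state (ans, cnt), then the final cnt == 3 check.
def solution (S : String) : Int :=
  (if ((PySem.List.pyRange 1 ((S.toList.length : Int)) 1).foldl
      (fun (st : Int × Int) i =>
        if pvOrd (PySem.List.pyGetD S.toList i ' ') - pvOrd (PySem.List.pyGetD S.toList (i - 1) ' ') = 1 then
          (st.1, st.2 + 1)
        else
          (if st.2 = 3 then st.1 + 1 else st.1, 1))
      (0, 1)).2 = 3
   then ((PySem.List.pyRange 1 ((S.toList.length : Int)) 1).foldl
      (fun (st : Int × Int) i =>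
        if pvOrd (PySem.List.pyGetD S.toList i ' ') - pvOrd (PySem.List.pyGetD S.toList (i - 1) ' ') = 1 then
          (st.1, st.2 + 1)
        else
          (if st.2 = 3 then st.1 + 1 else st.1, 1))
      (0, 1)).1 + 1
   else ((PySem.List.pyRange 1 ((S.toList.length : Int)) 1).foldl
      (fun (st : Int × Int) i =>
        if pvOrd (PySem.List.pyGetD S.toList i ' ') - pvOrd (PySem.List.pyGetD S.toList (i - 1) ' ') = 1 then
          (st.1, st.2 + 1)
        else
          (if st.2 = 3 then st.1 + 1 else st.1, 1))
      (0, 1)).1)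

-- ===== PORT B =====
def pvStepB (a b : Char) : Bool := decide (pvOrd b - pvOrd a = 1)

-- B's is_exact_triple_start(i): the window S[i..i+2] is an increasing-by-1 triple, maximal on both sides
def pvIsRunStart (l : List Char) (n i : Int) : Bool :=
  pvStepB (PySem.List.pyGetD l i ' ') (PySem.List.pyGetD l (i + 1) ' ')
  && pvStepB (PySem.List.pyGetD l (i + 1) ' ') (PySem.List.pyGetD l (i + 2) ' ')
  && (decide (i = 0) || !pvStepB (PySem.List.pyGetD l (i - 1) ' ') (PySem.List.pyGetD l i ' '))
  && (decide (i + 3 = n) || !pvStepB (PySem.List.pyGetD l (i + 2) ' ') (PySem.List.pyGetD l (i + 3) ' '))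

-- B's sum over i in range(n - 2)
def solution_alt (S : String) : Int :=
  (PySem.List.pyRange 0 ((S.toList.length : Int) - 2) 1).foldl
    (fun acc i => if pvIsRunStart S.toList ((S.toList.length : Int)) i then acc + 1 else acc) 0

-- ===== PRECONDITION & SPEC =====
def Spec_solution (S : String) (out : Int) : Prop := out = solution_alt S
instance (S : String) (out : Int) : Decidable (Spec_solution S out) := by unfold Spec_solution; infer_instance

-- ===== CLAIM (what is proved, stated in full; the proofs are below) =====
def Claim_equal_solution : Prop := ∀ (S : String), Dom_solution S → Spec_solution S (solution S)

-- ===== LEMMAS AND PROOFS =====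

-- recursion-shaped form of B: count of maximal triples starting in suffix l; p = predecessor of l
def gcount (p : Option Char) (l : List Char) : Int :=
  match l with
  | a :: b :: c :: rest =>
    (if (pvStepB a b && pvStepB b c
         && (p.elim true (fun q => !pvStepB q a))
         && (rest.head?.elim true (fun r => !pvStepB c r))) then (1 : Int) else 0)
      + gcount (some a) (b :: c :: rest)
  | _ => 0
termination_by l.length
decreasing_by simp

-- recursion-shaped form of A's loop: cnt = current run length, p = previous char
def Ncount (cnt : Int) (p : Char) (l : List Char) : Int :=
  match l with
  | [] => if cnt = 3 then 1 else 0
  | c :: rest =>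
    if pvStepB p c then Ncount (cnt + 1) c rest
    else (if cnt = 3 then 1 else 0) + Ncount 1 c rest

-- length of the increasing chain continuing after p into l
def extRun (p : Char) (l : List Char) : Int :=
  match l with
  | [] => 0
  | c :: rest => if pvStepB p c then 1 + extRun c rest else 0

theorem extRun_nonneg (p : Char) (l : List Char) : 0 ≤ extRun p l := by
  induction l generalizing p with
  | nil => simp [extRun]
  | cons c rest ih => simp only [extRun]; split <;> [linarith [ih c]; rfl]

theorem gcount_skip (p c : Char) (rest : List Char) (h : pvStepB p c = true) :
    gcount (some p) (c :: rest) = gcount (some c) rest := by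
  match rest with
  | [] => simp [gcount]
  | [b] => simp [gcount]
  | b :: d :: r => simp [gcount, h]

theorem extRun_eq_zero_iff (p : Char) (l : List Char) :
    extRun p l = 0 ↔ (l.head?.elim true (fun r => !pvStepB p r)) = true := by
  match l with
  | [] => simp [extRun]
  | c :: rest =>
    simp only [extRun, List.head?_cons, Option.elim]
    by_cases h : pvStepB p c = true
    · have := extRun_nonneg c rest
      simp only [h, if_true, Bool.not_true]
      constructor
      · intro hx; omega
      · intro hx; cases hx
    · simp [h]

theorem gcount_cons (p : Option Char) (c : Char) (rest : List Char) :
    gcount p (c :: rest)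
      = (if ((p.elim true (fun q => !pvStepB q c)) && decide (extRun c rest = 2)) then (1 : Int) else 0)
        + gcount (some c) rest := by
  match rest with
  | [] => simp [gcount, extRun]
  | [b] =>
    have hb : extRun c [b] ≠ 2 := by
      have := extRun_nonneg b ([] : List Char)
      simp only [extRun]
      split <;> simp
    simp [gcount, hb]
  | b :: d :: r =>
    by_cases h1 : pvStepB c b = true
    · by_cases h2 : pvStepB b d = true
      · have h4 := extRun_nonneg d r
        have hext : extRun c (b :: d :: r) = 2 + extRun d r := by
          simp [extRun, h1, h2]; ring
        by_cases h5 : extRun d r = 0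
        · have h6 := (extRun_eq_zero_iff d r).mp h5
          simp [gcount, h1, h2, h6, hext, h5]
        · have h6 : ¬ ((r.head?.elim true (fun x => !pvStepB d x)) = true) := by
            intro hx; exact h5 ((extRun_eq_zero_iff d r).mpr hx)
          have h7 : extRun c (b :: d :: r) ≠ 2 := by rw [hext]; omega
          simp [gcount, h1, h2, h6, h7]
      · have h7 : extRun c (b :: d :: r) ≠ 2 := by
          have := extRun_nonneg b (d :: r)
          simp [extRun, h1, h2]
        simp [gcount, h1, h2, h7]
    · have h7 : extRun c (b :: d :: r) ≠ 2 := by simp [extRun, h1]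
      simp [gcount, h1, h7]

theorem key_lemma (l : List Char) (cnt : Int) (p : Char) :
    Ncount cnt p l = (if cnt + extRun p l = 3 then (1 : Int) else 0) + gcount (some p) l := by
  induction l generalizing cnt p with
  | nil => simp [Ncount, extRun, gcount]
  | cons c rest ih =>
    by_cases h : pvStepB p c = true
    · have hg := gcount_skip p c rest h
      simp only [Ncount, extRun, h, if_true, hg, ih (cnt + 1) c]
      have he : cnt + (1 + extRun c rest) = 3 ↔ cnt + 1 + extRun c rest = 3 := by omega
      rw [if_congr he rfl rfl]
    · have hg := gcount_cons (some p) c rest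
      simp only [Ncount, extRun, h, ih 1 c, hg]
      simp only [Option.elim, h, Bool.not_false] at *
      have he : (1 : Int) + extRun c rest = 3 ↔ extRun c rest = 2 := by omega
      rw [if_congr he rfl rfl]
      simp

theorem getD_append_getLast (pre : List Char) (hp : pre ≠ []) (ys : List Char) (d : Char) :
    (pre ++ ys).getD (pre.length - 1) d = pre.getLast hp := by
  have h1 : pre.length - 1 < pre.length := by
    cases pre with
    | nil => exact absurd rfl hp
    | cons a t => simp
  rw [List.getD_eq_getElem?_getD, List.getElem?_append_left h1, List.getLast_eq_getElem]
  simp [List.getElem?_eq_getElem h1]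

theorem getD_append_add (pre ys : List Char) (k : Nat) (d : Char) :
    (pre ++ ys).getD (pre.length + k) d = ys.getD k d := by
  simp [List.getD_eq_getElem?_getD, List.getElem?_append_right (Nat.le_add_right pre.length k)]

theorem bridgeA (xs : List Char) : ∀ (pre : List Char) (hp : pre ≠ []) (ans cnt : Int),
    (if ((PySem.List.pyRange (pre.length : Int) (((pre ++ xs).length : Int)) 1).foldl
        (fun (st : Int × Int) i =>
          if pvOrd (PySem.List.pyGetD (pre ++ xs) i ' ') - pvOrd (PySem.List.pyGetD (pre ++ xs) (i - 1) ' ') = 1 then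
            (st.1, st.2 + 1)
          else
            (if st.2 = 3 then st.1 + 1 else st.1, 1))
        (ans, cnt)).2 = 3
     then ((PySem.List.pyRange (pre.length : Int) (((pre ++ xs).length : Int)) 1).foldl
        (fun (st : Int × Int) i =>
          if pvOrd (PySem.List.pyGetD (pre ++ xs) i ' ') - pvOrd (PySem.List.pyGetD (pre ++ xs) (i - 1) ' ') = 1 then
            (st.1, st.2 + 1)
          else
            (if st.2 = 3 then st.1 + 1 else st.1, 1))
        (ans, cnt)).1 + 1
     else ((PySem.List.pyRange (pre.length : Int) (((pre ++ xs).length : Int)) 1).foldl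
        (fun (st : Int × Int) i =>
          if pvOrd (PySem.List.pyGetD (pre ++ xs) i ' ') - pvOrd (PySem.List.pyGetD (pre ++ xs) (i - 1) ' ') = 1 then
            (st.1, st.2 + 1)
          else
            (if st.2 = 3 then st.1 + 1 else st.1, 1))
        (ans, cnt)).1)
    = ans + Ncount cnt (pre.getLast hp) xs := by
  induction xs with
  | nil =>
    intro pre hp ans cnt
    rw [List.append_nil, PySem.List.pyRange_one_eq_nil (le_refl _)]
    simp only [List.foldl_nil, Ncount]
    split_ifs <;> ring
  | cons c xs' ih =>
    intro pre hp ans cnt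
    have hlt : (pre.length : Int) < (((pre ++ c :: xs').length : Int)) := by
      simp [List.length_append]
    rw [PySem.List.pyRange_one_cons hlt, List.foldl_cons]
    have e1 : PySem.List.pyGetD (pre ++ c :: xs') (pre.length : Int) ' ' = c := by
      rw [PySem.List.pyGetD_natCast]
      have h0 := getD_append_add pre (c :: xs') 0 ' '
      rw [Nat.add_zero] at h0
      exact h0
    have hc1 : (1:Nat) ≤ pre.length := by
      cases pre with
      | nil => exact absurd rfl hp
      | cons a t => simp
    have e2 : PySem.List.pyGetD (pre ++ c :: xs') ((pre.length : Int) - 1) ' ' = pre.getLast hp := by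
      have hcast : (pre.length : Int) - 1 = ((pre.length - 1 : Nat) : Int) := by omega
      rw [hcast, PySem.List.pyGetD_natCast]
      exact getD_append_getLast pre hp (c :: xs') ' '
    rw [e1, e2]
    have hpre' : (pre ++ [c]) ≠ [] := by simp
    have hrest : ∀ (ans2 cnt2 : Int),
        (if ((PySem.List.pyRange ((pre.length : Int) + 1) (((pre ++ c :: xs').length : Int)) 1).foldl
            (fun (st : Int × Int) i =>
              if pvOrd (PySem.List.pyGetD (pre ++ c :: xs') i ' ') - pvOrd (PySem.List.pyGetD (pre ++ c :: xs') (i - 1) ' ') = 1 then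
                (st.1, st.2 + 1)
              else
                (if st.2 = 3 then st.1 + 1 else st.1, 1))
            (ans2, cnt2)).2 = 3
         then ((PySem.List.pyRange ((pre.length : Int) + 1) (((pre ++ c :: xs').length : Int)) 1).foldl
            (fun (st : Int × Int) i =>
              if pvOrd (PySem.List.pyGetD (pre ++ c :: xs') i ' ') - pvOrd (PySem.List.pyGetD (pre ++ c :: xs') (i - 1) ' ') = 1 then
                (st.1, st.2 + 1)
              else
                (if st.2 = 3 then st.1 + 1 else st.1, 1))
            (ans2, cnt2)).1 + 1
         else ((PySem.List.pyRange ((pre.length : Int) + 1) (((pre ++ c :: xs').length : Int)) 1).foldl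
            (fun (st : Int × Int) i =>
              if pvOrd (PySem.List.pyGetD (pre ++ c :: xs') i ' ') - pvOrd (PySem.List.pyGetD (pre ++ c :: xs') (i - 1) ' ') = 1 then
                (st.1, st.2 + 1)
              else
                (if st.2 = 3 then st.1 + 1 else st.1, 1))
            (ans2, cnt2)).1)
        = ans2 + Ncount cnt2 c xs' := by
      intro ans2 cnt2
      have hcast : ((pre.length : Int) + 1) = (((pre ++ [c]).length : Nat) : Int) := by
        simp [List.length_append]
      have hlist : pre ++ c :: xs' = (pre ++ [c]) ++ xs' := by simp
      have hlast : (pre ++ [c]).getLast hpre' = c := by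
        simp
      have := ih (pre ++ [c]) hpre' ans2 cnt2
      rw [hlast] at this
      rw [hcast, hlist]
      exact this
    by_cases hstep : pvOrd c - pvOrd (pre.getLast hp) = 1
    · have hb : pvStepB (pre.getLast hp) c = true := by simp [pvStepB, hstep]
      rw [if_pos hstep, hrest ans (cnt + 1)]
      have hN : Ncount cnt (pre.getLast hp) (c :: xs') = Ncount (cnt + 1) c xs' := by
        simp [Ncount, hb]
      rw [hN]
    · have hb : pvStepB (pre.getLast hp) c = false := by simp [pvStepB, hstep]
      rw [if_neg hstep, hrest (if cnt = 3 then ans + 1 else ans) 1]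
      have hN : Ncount cnt (pre.getLast hp) (c :: xs') = (if cnt = 3 then 1 else 0) + Ncount 1 c xs' := by
        simp [Ncount, hb]
      rw [hN]
      split_ifs <;> ring

theorem gcount_three (p : Option Char) (a b c : Char) (rest : List Char) :
    gcount p (a :: b :: c :: rest)
      = (if (pvStepB a b && pvStepB b c
         && (p.elim true (fun q => !pvStepB q a))
         && (rest.head?.elim true (fun r => !pvStepB c r))) then (1 : Int) else 0)
        + gcount (some a) (b :: c :: rest) := by
  rw [gcount]

theorem bridgeB (xs : List Char) : ∀ (pre : List Char) (acc : Int),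
    (PySem.List.pyRange (pre.length : Int) (((pre ++ xs).length : Int) - 2) 1).foldl
      (fun acc i => if pvIsRunStart (pre ++ xs) (((pre ++ xs).length : Int)) i then acc + 1 else acc) acc
    = acc + gcount pre.getLast? xs := by
  induction xs with
  | nil =>
    intro pre acc
    rw [PySem.List.pyRange_one_eq_nil (by simp)]
    simp [gcount]
  | cons a t ih =>
    intro pre acc
    match t with
    | [] =>
      rw [PySem.List.pyRange_one_eq_nil (by simp)]
      simp [gcount]
    | [b] =>
      rw [PySem.List.pyRange_one_eq_nil (by simp)]
      simp [gcount]
    | b :: c :: rest =>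
      have hlt : (pre.length : Int) < ((pre ++ a :: b :: c :: rest).length : Int) - 2 := by
        simp; omega
      rw [PySem.List.pyRange_one_cons hlt, List.foldl_cons]
      have e0 : PySem.List.pyGetD (pre ++ a :: b :: c :: rest) (pre.length : Int) ' ' = a := by
        rw [PySem.List.pyGetD_natCast]
        simp
      have e1 : PySem.List.pyGetD (pre ++ a :: b :: c :: rest) ((pre.length : Int) + 1) ' ' = b := by
        have hc : ((pre.length : Int) + 1) = (((pre.length + 1 : Nat)) : Int) := by push_cast; ring
        rw [hc, PySem.List.pyGetD_natCast]
        simp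
      have e2 : PySem.List.pyGetD (pre ++ a :: b :: c :: rest) ((pre.length : Int) + 2) ' ' = c := by
        have hc : ((pre.length : Int) + 2) = (((pre.length + 2 : Nat)) : Int) := by push_cast; ring
        rw [hc, PySem.List.pyGetD_natCast]
        simp
      have hterm : pvIsRunStart (pre ++ a :: b :: c :: rest) (((pre ++ a :: b :: c :: rest).length : Int)) (pre.length : Int)
          = (pvStepB a b && pvStepB b c
             && (pre.getLast?.elim true (fun q => !pvStepB q a))
             && (rest.head?.elim true (fun r => !pvStepB c r))) := by
        unfold pvIsRunStart
        rw [e0, e1, e2]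
        have hleft : (decide ((pre.length : Int) = 0)
            || !pvStepB (PySem.List.pyGetD (pre ++ a :: b :: c :: rest) ((pre.length : Int) - 1) ' ') a)
            = (pre.getLast?.elim true (fun q => !pvStepB q a)) := by
          match pre with
          | [] => simp
          | p0 :: ps =>
            have hne : (p0 :: ps) ≠ [] := by simp
            have hd : decide (((p0 :: ps).length : Int) = 0) = false := by simp; omega
            have em : PySem.List.pyGetD ((p0 :: ps) ++ a :: b :: c :: rest) (((p0 :: ps).length : Int) - 1) ' '
                = (p0 :: ps).getLast hne := by
              have hc : (((p0 :: ps).length : Int) - 1) = ((((p0 :: ps).length - 1 : Nat)) : Int) := by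
                simp
              rw [hc, PySem.List.pyGetD_natCast]
              exact getD_append_getLast (p0 :: ps) hne (a :: b :: c :: rest) ' '
            rw [hd, em, List.getLast?_eq_some_getLast hne]
            simp
        have hright : (decide ((pre.length : Int) + 3 = ((pre ++ a :: b :: c :: rest).length : Int))
            || !pvStepB c (PySem.List.pyGetD (pre ++ a :: b :: c :: rest) ((pre.length : Int) + 3) ' '))
            = (rest.head?.elim true (fun r => !pvStepB c r)) := by
          match rest with
          | [] => simp
          | r0 :: r' =>
            have hd : decide ((pre.length : Int) + 3 = ((pre ++ a :: b :: c :: r0 :: r').length : Int)) = false := by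
              simp; omega
            have e3 : PySem.List.pyGetD (pre ++ a :: b :: c :: r0 :: r') ((pre.length : Int) + 3) ' ' = r0 := by
              have hc : ((pre.length : Int) + 3) = (((pre.length + 3 : Nat)) : Int) := by push_cast; ring
              rw [hc, PySem.List.pyGetD_natCast]
              simp
            rw [hd, e3]
            simp
        rw [hleft, hright]
      rw [hterm]
      have hih : ∀ acc2 : Int,
          (PySem.List.pyRange ((pre.length : Int) + 1) (((pre ++ a :: b :: c :: rest).length : Int) - 2) 1).foldl
            (fun acc i => if pvIsRunStart (pre ++ a :: b :: c :: rest) (((pre ++ a :: b :: c :: rest).length : Int)) i then acc + 1 else acc) acc2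
          = acc2 + gcount (some a) (b :: c :: rest) := by
        intro acc2
        have hcast : ((pre.length : Int) + 1) = (((pre ++ [a]).length : Nat) : Int) := by simp
        have hlist : pre ++ a :: b :: c :: rest = (pre ++ [a]) ++ (b :: c :: rest) := by simp
        have hlast : (pre ++ [a]).getLast? = some a := by
          simp
        have := ih (pre ++ [a]) acc2
        rw [hlast] at this
        rw [hcast, hlist]
        exact this
      rw [hih, gcount_three]
      split_ifs <;> ring

theorem solution_spec : Claim_equal_solution := by
  intro S _
  unfold Spec_solution
  have hb := bridgeB S.toList [] 0
  simp only [List.nil_append, List.length_nil, Nat.cast_zero, List.getLast?_nil] at hb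
  have hBalt : solution_alt S = gcount none S.toList := by
    unfold solution_alt
    exact hb.trans (zero_add _)
  rw [hBalt]
  cases hS : S.toList with
  | nil =>
    unfold solution
    rw [hS]
    rw [PySem.List.pyRange_one_eq_nil (by simp)]
    simp [gcount]
  | cons x xs =>
    have ha := bridgeA xs [x] (by simp) 0 1
    simp only [List.singleton_append, List.length_singleton, Nat.cast_one,
      List.getLast_singleton] at ha
    have hr : gcount none (x :: xs) = 0 + Ncount 1 x xs := by
      rw [gcount_cons none x xs, key_lemma xs 1 x]
      simp only [Option.elim, Bool.true_and]
      have he : (1 : Int) + extRun x xs = 3 ↔ extRun x xs = 2 := by omega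
      rw [if_congr he rfl rfl]
      simp only [decide_eq_true_eq]
      split_ifs <;> ring
    unfold solution
    rw [hS, hr]
    exact ha
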